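-- pv_equiv track=rewrite | github.com/TrevorAhlers/CSCI4970-Capsoft-Solutions-Project | BackEnd/Controller/assigner.py | find_max_frequency_dept
-- ===== SOURCE A (Python) =====
-- from typing import Dict
--
-- def find_max_frequency_dept(frequency_map: Dict[str, int]):
-- 	"""
-- 	Returns department(s) with the highest count from a frequency map
-- 	"""
-- 	max_solution = []
-- 	sorted_items = sorted(frequency_map.items(), key=lambda x: x[1], reverse=True)
-- 	if sorted_items:
-- 		max_value = sorted_items[0][1]
-- 		for room in sorted_items:
-- 			if room[1] != max_value:
-- 				break
-- 			max_solution.append(room[0])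
-- 		return max_solution, max_value
-- 	return None, 0
-- ===== SOURCE B (Python) =====
-- def find_max_frequency_dept(frequency_map):
-- 	"""
-- 	Returns department(s) with the highest count from a frequency map
-- 	"""
-- 	if not frequency_map:
-- 		return None, 0
-- 	max_value = max(frequency_map.values())
-- 	max_solution = [dept for dept, count in frequency_map.items() if count == max_value]
-- 	return max_solution, max_value
-- ===== Notes on version B (the rewrite author's own statement) =====
-- stated objective: simpler
-- what changed: Replaces the sort-then-scan (sort items descending by count, collect the tied prefix) with a single max() over the values followed by a filter in insertion order, which matches the stable sort's tie order.
import Mathlib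
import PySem

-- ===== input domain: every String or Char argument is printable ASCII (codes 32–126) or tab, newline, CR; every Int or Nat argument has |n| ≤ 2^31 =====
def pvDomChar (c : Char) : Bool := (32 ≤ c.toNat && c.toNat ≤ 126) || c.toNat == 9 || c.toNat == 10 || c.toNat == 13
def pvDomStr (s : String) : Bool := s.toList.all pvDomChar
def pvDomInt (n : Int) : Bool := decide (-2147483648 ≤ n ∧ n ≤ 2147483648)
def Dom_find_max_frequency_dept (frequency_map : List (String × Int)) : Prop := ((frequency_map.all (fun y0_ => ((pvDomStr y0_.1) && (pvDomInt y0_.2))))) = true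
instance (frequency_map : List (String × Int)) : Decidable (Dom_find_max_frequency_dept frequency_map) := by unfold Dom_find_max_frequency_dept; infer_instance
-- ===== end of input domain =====

-- B replaces A's sort-then-scan by a single max over the values plus a filter in
-- insertion order; the filter order matches the stable sort's tie order.

-- ===== PORT A =====
-- the 'for room in sorted_items: if room[1] != max_value: break; max_solution.append(room[0])' loop
def pvALoop (max_value : Int) : List (String × Int) → List String → List String
  | [], max_solution => max_solution
  | room :: rest, max_solution =>
      if room.2 ≠ max_value then max_solution
      else pvALoop max_value rest (max_solution ++ [room.1])

def find_max_frequency_dept (frequency_map : List (String × Int)) : Option (List String) × Int :=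
  let sorted_items := PySem.List.sorted frequency_map (fun x => x.2) true
  match sorted_items with
  | [] => (none, 0)
  | first :: _ =>
      let max_value := first.2
      (some (pvALoop max_value sorted_items []), max_value)

-- ===== PORT B =====
def find_max_frequency_dept_alt (frequency_map : List (String × Int)) : Option (List String) × Int :=
  if frequency_map = [] then (none, 0)
  else
    match PySem.List.max? (frequency_map.map Prod.snd) (fun v => v) with
    | none => (none, 0)  -- unreachable: the list is nonempty
    | some max_value =>
        (some ((frequency_map.filter (fun p => p.2 == max_value)).map Prod.fst), max_value)

-- ===== PRECONDITION & SPEC =====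
def Spec_find_max_frequency_dept (frequency_map : List (String × Int)) (out : Option (List String) × Int) : Prop := out = find_max_frequency_dept_alt frequency_map
instance (frequency_map : List (String × Int)) (out : Option (List String) × Int) : Decidable (Spec_find_max_frequency_dept frequency_map out) := by unfold Spec_find_max_frequency_dept; infer_instance

-- ===== CLAIM (what is proved, stated in full; the proofs are below) =====
def Claim_equal_find_max_frequency_dept : Prop := ∀ (frequency_map : List (String × Int)), Dom_find_max_frequency_dept frequency_map → Spec_find_max_frequency_dept frequency_map (find_max_frequency_dept frequency_map)

-- ===== LEMMAS AND PROOFS =====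

-- inserting x into a descending-sorted acc puts it AFTER all elements with its key,
-- so the filter at any key value grows by x exactly at the back
theorem pv_insertBy_filter (x : String × Int) (c : Int) :
    ∀ (acc : List (String × Int)), acc.Pairwise (fun a b => b.2 ≤ a.2) →
    (PySem.List.insertBy (fun a b => decide (b.2 < a.2)) x acc).filter (fun p => p.2 == c)
      = acc.filter (fun p => p.2 == c) ++ (if x.2 == c then [x] else []) := by
  intro acc
  induction acc with
  | nil =>
    intro _
    by_cases hc : x.2 = c <;> simp [PySem.List.insertBy, hc]
  | cons y ys ih =>
    intro hp
    rw [List.pairwise_cons] at hp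
    by_cases hlt : y.2 < x.2
    · have hins : PySem.List.insertBy (fun a b => decide (b.2 < a.2)) x (y :: ys) = x :: y :: ys := by
        simp [PySem.List.insertBy, hlt]
      rw [hins]
      by_cases hc : x.2 = c
      · have hfy : (y :: ys).filter (fun p => p.2 == c) = [] := by
          apply List.filter_eq_nil_iff.mpr
          intro p hpmem
          rcases List.mem_cons.mp hpmem with h | h
          · subst h; simp; omega
          · have := hp.1 p h; simp; omega
        simp [hc, hfy]
      · simp [List.filter_cons, hc]
    · have hins : PySem.List.insertBy (fun a b => decide (b.2 < a.2)) x (y :: ys)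
          = y :: PySem.List.insertBy (fun a b => decide (b.2 < a.2)) x ys := by
        simp [PySem.List.insertBy, hlt]
      rw [hins, List.filter_cons, List.filter_cons, ih hp.2]
      by_cases hyc : y.2 = c <;> simp [hyc]

-- the stable sort permutes but never reorders elements of equal count: filtering at any count commutes with it
theorem pv_filter_sorted (frequency_map : List (String × Int)) (c : Int) :
    (PySem.List.sorted frequency_map (fun x => x.2) true).filter (fun p => p.2 == c)
      = frequency_map.filter (fun p => p.2 == c) := by
  induction frequency_map using List.reverseRecOn with
  | nil => simp [PySem.List.sorted]
  | append_singleton ys x ih =>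
    have hfold := PySem.List.sorted_rev_eq_foldl_insertBy (ys ++ [x]) (fun p : String × Int => p.2)
    rw [List.foldl_append] at hfold
    simp only [List.foldl_cons, List.foldl_nil] at hfold
    rw [← PySem.List.sorted_rev_eq_foldl_insertBy ys (fun p : String × Int => p.2)] at hfold
    rw [hfold, pv_insertBy_filter x c _ (PySem.List.sorted_pairwise_rev ys (fun p => p.2)),
        ih, List.filter_append]
    by_cases hc : x.2 = c <;> simp [hc]

-- the break-loop over a descending list whose elements are all ≤ M collects exactly the M-valued elements
theorem pv_loop_eq_filter (M : Int) :
    ∀ (s : List (String × Int)) (acc : List String),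
    s.Pairwise (fun a b => b.2 ≤ a.2) → (∀ p ∈ s, p.2 ≤ M) →
    pvALoop M s acc = acc ++ (s.filter (fun p => p.2 == M)).map Prod.fst := by
  intro s
  induction s with
  | nil => intro acc _ _; simp [pvALoop]
  | cons p rest ih =>
    intro acc hp hle
    rw [List.pairwise_cons] at hp
    by_cases hpm : p.2 = M
    · rw [show pvALoop M (p :: rest) acc = pvALoop M rest (acc ++ [p.1]) from by
        simp [pvALoop, hpm]]
      rw [ih _ hp.2 (fun q hq => hle q (List.mem_cons_of_mem _ hq)), List.filter_cons]
      simp [hpm]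
    · rw [show pvALoop M (p :: rest) acc = acc from by simp [pvALoop, hpm]]
      have hrest : (p :: rest).filter (fun q => q.2 == M) = [] := by
        apply List.filter_eq_nil_iff.mpr
        intro q hq
        rcases List.mem_cons.mp hq with h | h
        · subst h; simp [hpm]
        · have h1 := hp.1 q h
          have h2 := hle p List.mem_cons_self
          simp; omega
      simp [hrest]

theorem find_max_frequency_dept_spec' : ∀ (fm : List (String × Int)),
    find_max_frequency_dept fm = find_max_frequency_dept_alt fm := by
  intro fm
  unfold find_max_frequency_dept find_max_frequency_dept_alt
  cases hs : PySem.List.sorted fm (fun x => x.2) true with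
  | nil =>
    have : fm = [] := (PySem.List.sorted_eq_nil_iff _ _ _).mp hs
    simp [this]
  | cons first rest =>
    have hfm : fm ≠ [] := by
      intro h; subst h; simp [PySem.List.sorted] at hs
    simp only [if_neg hfm]
    have hfirst_mem : first ∈ fm := by
      have h : first ∈ PySem.List.sorted fm (fun x => x.2) true := by
        rw [hs]; exact List.mem_cons_self
      exact (PySem.List.mem_sorted _ _ _ _).mp h
    have hmax_ub := PySem.List.key_head_sorted_rev_ge fm (fun x => x.2) hs
    cases hm : PySem.List.max? (fm.map Prod.snd) (fun v => v) with
    | none =>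
      rw [PySem.List.max?_eq_none_iff] at hm
      exact (hfm (List.map_eq_nil_iff.mp hm)).elim
    | some m =>
      have hmem := PySem.List.max?_mem hm
      obtain ⟨q, hq, hq2⟩ := List.mem_map.mp hmem
      have h1 : m ≤ first.2 := by rw [← hq2]; exact hmax_ub q hq
      have h2 : first.2 ≤ m := PySem.List.max?_isMax hm first.2 (List.mem_map_of_mem hfirst_mem)
      have hM : m = first.2 := le_antisymm h1 h2
      have hloop := pv_loop_eq_filter first.2 (first :: rest) []
        (by rw [← hs]; exact PySem.List.sorted_pairwise_rev fm (fun x => x.2))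
        (by intro p hp
            have : p ∈ fm := (PySem.List.mem_sorted _ _ _ _).mp (by rw [hs]; exact hp)
            exact hmax_ub p this)
      have hfs := pv_filter_sorted fm first.2
      rw [hs] at hfs
      simp [hM, hloop, hfs]

-- ===== VERDICT (by name: the statement is the Claim_ definition above) =====
theorem find_max_frequency_dept_spec : Claim_equal_find_max_frequency_dept := by
  intro fm _
  unfold Spec_find_max_frequency_dept
  exact find_max_frequency_dept_spec' fm
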